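-- pv_equiv track=rewrite | github.com/ZirconixUK/map-game | make_poi_pack.py | is_curated
-- ===== SOURCE A (Python) =====
-- from typing import Any, Dict, List, Optional, Tuple
--
-- def is_curated(categories: List[str]) -> bool:
--     excluded = {"shop", "accommodation", "food_drink"}
--     if any(c in excluded for c in categories) and "pub" not in categories:
--         return False
--
--     keepers = {
--         "pub",
--         "museum_gallery",
--         "landmark",
--         "historic_plaque",
--         "monument_memorial",
--         "architecture",
--         "civic",
--         "religious",
--         "park_public_space",
--         "waterfront",
--         "transport_hub",
--     }
--     return any(c in keepers for c in categories)
-- ===== SOURCE B (Python) =====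
-- def is_curated(categories):
--     CLASS = {
--         "shop": 1, "accommodation": 1, "food_drink": 1,
--         "pub": 6, "museum_gallery": 4, "landmark": 4, "historic_plaque": 4,
--         "monument_memorial": 4, "architecture": 4, "civic": 4, "religious": 4,
--         "park_public_space": 4, "waterfront": 4, "transport_hub": 4,
--     }
--     mask = 0
--     for c in categories:
--         mask |= CLASS.get(c, 0)
--     if mask & 1 and not mask & 2:
--         return False
--     return bool(mask & 4)
-- ===== Notes on version B (the rewrite author's own statement) =====
-- stated objective: alternative
-- what changed: Replaces A's set-membership any-scans with a classification table mapping each known category to a bitmask (excluded=1, pub=2, keeper=4), OR-accumulates one mask over the list, and decides from the mask's bits.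
import Mathlib
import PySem

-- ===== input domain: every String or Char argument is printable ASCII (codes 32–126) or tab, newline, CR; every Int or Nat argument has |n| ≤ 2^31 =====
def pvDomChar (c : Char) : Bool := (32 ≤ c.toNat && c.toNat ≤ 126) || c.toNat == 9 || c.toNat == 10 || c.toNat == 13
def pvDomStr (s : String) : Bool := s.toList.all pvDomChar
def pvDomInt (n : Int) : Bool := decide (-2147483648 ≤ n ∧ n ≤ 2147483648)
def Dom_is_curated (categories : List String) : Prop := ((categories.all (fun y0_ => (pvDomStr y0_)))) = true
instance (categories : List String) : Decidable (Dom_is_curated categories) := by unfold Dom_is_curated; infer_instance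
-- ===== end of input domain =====

-- B replaces A's set-membership any-scans by a classification table (category → bitmask: excluded=1, pub=2, keeper=4),
-- OR-accumulates one mask over the list and decides from the mask's bits (alternative formulation, same cost).

-- ===== PORT A =====
def pvExcluded (c : String) : Bool :=
  c == "shop" || c == "accommodation" || c == "food_drink"

def pvKeepers (c : String) : Bool :=
  c == "pub" || c == "museum_gallery" || c == "landmark" || c == "historic_plaque" ||
  c == "monument_memorial" || c == "architecture" || c == "civic" || c == "religious" ||
  c == "park_public_space" || c == "waterfront" || c == "transport_hub"

def is_curated (categories : List String) : Bool :=
  if categories.any (fun c => pvExcluded c) && !(categories.contains "pub") then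
    false
  else
    categories.any (fun c => pvKeepers c)

-- ===== PORT B =====
-- the dict literal CLASS (association list, insertion order); values are small nonnegative Python ints,
-- ported as Nat (|, & on nonnegative ints coincide with Nat.lor/Nat.land, so this is exact here)
def pvClass : PySem.Dict String Nat :=
  PySem.Dict.ofList
  [("shop", 1), ("accommodation", 1), ("food_drink", 1),
   ("pub", 6), ("museum_gallery", 4), ("landmark", 4), ("historic_plaque", 4),
   ("monument_memorial", 4), ("architecture", 4), ("civic", 4), ("religious", 4),
   ("park_public_space", 4), ("waterfront", 4), ("transport_hub", 4)]

def is_curated_alt (categories : List String) : Bool :=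
  let mask := categories.foldl (fun m c => m ||| PySem.Dict.getD pvClass c 0) 0
  if (mask &&& 1 != 0) && !(mask &&& 2 != 0) then false
  else mask &&& 4 != 0

-- ===== PRECONDITION & SPEC =====
def Spec_is_curated (categories : List String) (out : Bool) : Prop := out = is_curated_alt categories
instance (categories : List String) (out : Bool) : Decidable (Spec_is_curated categories out) := by unfold Spec_is_curated; infer_instance

-- ===== CLAIM =====
def Claim_equal_is_curated : Prop := ∀ (categories : List String), Dom_is_curated categories → Spec_is_curated categories (is_curated categories)

-- ===== LEMMAS AND PROOFS =====
-- the literal dict, with its keys all distinct, as a plain item list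
theorem pvClass_mk : pvClass = PySem.Dict.mk
    [("shop", 1), ("accommodation", 1), ("food_drink", 1),
     ("pub", 6), ("museum_gallery", 4), ("landmark", 4), ("historic_plaque", 4),
     ("monument_memorial", 4), ("architecture", 4), ("civic", 4), ("religious", 4),
     ("park_public_space", 4), ("waterfront", 4), ("transport_hub", 4)] := by decide

-- a bit of a first-match lookup in a key-nodup association list, as an `any` over its items
theorem pvLookup_testBit (l : List (String × Nat)) (c : String) (i : Nat)
    (hnd : (l.map Prod.fst).Nodup) :
    ((PySem.Dict.mk l).getD c 0).testBit i
      = l.any (fun p => p.1 == c && p.2.testBit i) := by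
  induction l with
  | nil => simp [PySem.Dict.getD_eq_get?_getD, PySem.Dict.get?]
  | cons p t ih =>
      obtain ⟨k, v⟩ := p
      simp only [List.map_cons, List.nodup_cons] at hnd
      rw [PySem.Dict.getD_eq_get?_getD, PySem.Dict.get?_mk_cons]
      cases h : (k == c) with
      | true =>
          have hk : k = c := eq_of_beq h
          have ht : t.any (fun p => p.1 == c && p.2.testBit i) = false := by
            rw [List.any_eq_false]
            intro q hq hband
            exact hnd.1 (hk ▸ (eq_of_beq (Bool.and_elim_left hband) ▸ List.mem_map_of_mem hq))
          simp [h, ht]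
      | false =>
          simp only [Bool.false_eq_true, if_false, List.any_cons, h, Bool.false_and,
            Bool.false_or, ← PySem.Dict.getD_eq_get?_getD]
          exact ih hnd.2

theorem pvClass_bit0 (c : String) : (PySem.Dict.getD pvClass c 0).testBit 0 = pvExcluded c := by
  rw [pvClass_mk, pvLookup_testBit _ _ _ (by decide)]
  simp [pvExcluded, List.any_cons, Bool.beq_comm, Bool.or_assoc]

theorem pvClass_bit1 (c : String) : (PySem.Dict.getD pvClass c 0).testBit 1 = (c == "pub") := by
  rw [pvClass_mk, pvLookup_testBit _ _ _ (by decide)]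
  simp [List.any_cons, Bool.beq_comm, show Nat.testBit 1 1 = false from by decide,
    show Nat.testBit 6 1 = true from by decide, show Nat.testBit 4 1 = false from by decide]

theorem pvClass_bit2 (c : String) : (PySem.Dict.getD pvClass c 0).testBit 2 = pvKeepers c := by
  rw [pvClass_mk, pvLookup_testBit _ _ _ (by decide)]
  simp [pvKeepers, List.any_cons, Bool.beq_comm, Bool.or_assoc,
    show Nat.testBit 1 2 = false from by decide, show Nat.testBit 6 2 = true from by decide,
    show Nat.testBit 4 2 = true from by decide]

theorem pvFold_testBit (categories : List String) (m : Nat) (i : Nat) :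
    (categories.foldl (fun m c => m ||| PySem.Dict.getD pvClass c 0) m).testBit i
      = (m.testBit i || categories.any (fun c => (PySem.Dict.getD pvClass c 0).testBit i)) := by
  induction categories generalizing m with
  | nil => simp
  | cons c cs ih => simp [ih, Nat.testBit_or, Bool.or_assoc]

theorem pvContains_any (categories : List String) :
    categories.contains "pub" = categories.any (fun c => c == "pub") := by
  induction categories with
  | nil => simp
  | cons c cs ih => rw [List.contains_cons, List.any_cons, ih, Bool.beq_comm]

-- mask & 2^i != 0 is exactly testBit i (stated at the three literal masks B uses)
theorem pvAnd1 (m : Nat) : (m &&& 1 != 0) = m.testBit 0 := by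
  have h := Nat.and_two_pow m 0
  simp only [pow_zero] at h
  rw [h]; cases hb : m.testBit 0 <;> simp

theorem pvAnd2 (m : Nat) : (m &&& 2 != 0) = m.testBit 1 := by
  have h := Nat.and_two_pow m 1
  norm_num at h
  rw [h]; cases hb : m.testBit 1 <;> simp

theorem pvAnd4 (m : Nat) : (m &&& 4 != 0) = m.testBit 2 := by
  have h := Nat.and_two_pow m 2
  norm_num at h
  rw [h]; cases hb : m.testBit 2 <;> simp

-- ===== VERDICT =====
theorem is_curated_spec : Claim_equal_is_curated := by
  intro categories _
  unfold Spec_is_curated is_curated is_curated_alt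
  simp only [pvAnd1, pvAnd2, pvAnd4, pvFold_testBit, pvClass_bit0, pvClass_bit1, pvClass_bit2,
    pvContains_any, Nat.zero_testBit, Bool.false_or]
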